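-- pv_equiv track=rewrite | github.com/55555-pzdr/tsubasa-rivals | battle_simulator.py | check_win_or_lose
-- ===== SOURCE A (Python) =====
-- def calc_own_rps(own_data, c_list):
--   own_rps = [0, 0, 0]
--   count = 0
--   for c in c_list:
--     own_rps[c] = own_rps[c] + own_data[count]
--     count += 1
--   return own_rps
--
-- def check_win_or_lose(enemy_rps, own_data):
--   # explore if there is a winning combination for the enemy
--   #   - https://hiraocafe.com/note/kumiwake.html
--   #     (7) How to divide 6 different balls into 3 people.
--   #         However, there is no one who does not receive
--   for c1 in (0, 1, 2):
--     for c2 in (0, 1, 2):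
--       for c3 in (0, 1, 2):
--         for c4 in (0, 1, 2):
--           for c5 in (0, 1, 2):
--             for c6 in (0, 1, 2):
--               own_rps = calc_own_rps(own_data, [c1, c2, c3, c4, c5, c6])
--               if own_rps[0] > enemy_rps[0] and own_rps[1] > enemy_rps[1] and own_rps[2] > enemy_rps[2]:
--                 return own_rps
-- ===== SOURCE B (Python) =====
-- def check_win_or_lose(enemy_rps, own_data):
--     # recursive first-fit over the first six own_data values, trying group 0,1,2 in order
--     def go(rest, sums):
--         if not rest:
--             if sums[0] > enemy_rps[0] and sums[1] > enemy_rps[1] and sums[2] > enemy_rps[2]: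
--                 return sums
--             return None
--         x = rest[0]
--         xs = rest[1:]
--         def bump(g):
--             new = sums.copy()
--             new[g] = new[g] + x
--             return new
--         return go(xs, bump(0)) or go(xs, bump(1)) or go(xs, bump(2))
--     return go([own_data[i] for i in range(6)], [0, 0, 0])
-- ===== Notes on version B (the rewrite author's own statement) =====
-- stated objective: simpler
-- what changed: Replaces A's six hard-coded nested loops, each recomputing all three group sums from scratch via calc_own_rps, with a single recursive first-fit helper over the six values that carries the running group sums and tries group 0,1,2 in order, preserving the lexicographic first winner.
-- outside the precondition, e.g. on check_win_or_lose([5], [0, 0, 0, 0, 0, 0]): A returns None, B returns None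
import Mathlib
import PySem

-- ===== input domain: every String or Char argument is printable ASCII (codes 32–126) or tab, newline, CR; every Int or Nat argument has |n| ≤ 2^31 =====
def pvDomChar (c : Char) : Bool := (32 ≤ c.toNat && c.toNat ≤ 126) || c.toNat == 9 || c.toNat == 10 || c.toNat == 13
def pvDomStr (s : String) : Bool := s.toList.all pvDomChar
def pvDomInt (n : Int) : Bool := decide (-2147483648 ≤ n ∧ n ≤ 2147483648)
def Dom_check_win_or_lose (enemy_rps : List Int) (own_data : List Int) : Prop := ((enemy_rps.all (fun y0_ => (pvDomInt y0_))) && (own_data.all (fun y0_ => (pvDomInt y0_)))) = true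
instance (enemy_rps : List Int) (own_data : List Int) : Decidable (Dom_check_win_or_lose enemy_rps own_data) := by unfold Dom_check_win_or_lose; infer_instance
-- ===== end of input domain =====

-- B replaces A's six hard-coded nested loops (recomputing every group sum from scratch per
-- combination) by one recursion over the first six values carrying running group sums; objective:
-- simpler. Equivalence of RETURN values on Pre_ (A mutates nothing observable).

-- ===== PORT A =====
def calc_own_rps (own_data : List Int) (c_list : List Nat) : List Int :=
  -- own_rps[c] += own_data[count]; indices are in range under Pre_, so getD is exact there
  (c_list.foldl
    (fun (st : List Int × Nat) c =>
      (st.1.set c (st.1.getD c 0 + own_data.getD st.2 0), st.2 + 1))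
    (([0, 0, 0] : List Int), (0 : Nat))).1

def check_win_or_lose (enemy_rps : List Int) (own_data : List Int) : Option (List Int) :=
  ([0, 1, 2] : List Nat).findSome? fun c1 =>
  ([0, 1, 2] : List Nat).findSome? fun c2 =>
  ([0, 1, 2] : List Nat).findSome? fun c3 =>
  ([0, 1, 2] : List Nat).findSome? fun c4 =>
  ([0, 1, 2] : List Nat).findSome? fun c5 =>
  ([0, 1, 2] : List Nat).findSome? fun c6 =>
    let own_rps := calc_own_rps own_data [c1, c2, c3, c4, c5, c6]
    if own_rps.getD 0 0 > enemy_rps.getD 0 0 ∧ own_rps.getD 1 0 > enemy_rps.getD 1 0 ∧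
        own_rps.getD 2 0 > enemy_rps.getD 2 0 then
      some own_rps
    else
      none

-- ===== PORT B =====
def goAlt (enemy_rps : List Int) : List Int → List Int → Option (List Int)
  | [], sums =>
      if sums.getD 0 0 > enemy_rps.getD 0 0 ∧ sums.getD 1 0 > enemy_rps.getD 1 0 ∧
          sums.getD 2 0 > enemy_rps.getD 2 0 then
        some sums
      else
        none
  | x :: xs, sums =>
      (goAlt enemy_rps xs (sums.set 0 (sums.getD 0 0 + x))).orElse fun _ =>
      (goAlt enemy_rps xs (sums.set 1 (sums.getD 1 0 + x))).orElse fun _ =>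
      goAlt enemy_rps xs (sums.set 2 (sums.getD 2 0 + x))

def check_win_or_lose_alt (enemy_rps : List Int) (own_data : List Int) : Option (List Int) :=
  -- [own_data[i] for i in range(6)]: getD is exact under Pre_ (own_data has ≥ 6 entries)
  goAlt enemy_rps ((List.range 6).map fun i => own_data.getD i 0) [0, 0, 0]

-- ===== PRECONDITION & SPEC =====
-- Pre_ excludes inputs where the Python A raises IndexError: own_data shorter than 6 (calc_own_rps
-- reads own_data[0..5]) or enemy_rps shorter than 3 (the win comparison reads enemy_rps[0..2]);
-- in a rare short-enemy corner A's short-circuit can still return None, and B does the same there.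
def Pre_check_win_or_lose (enemy_rps : List Int) (own_data : List Int) : Prop :=
  3 ≤ enemy_rps.length ∧ 6 ≤ own_data.length
instance (enemy_rps : List Int) (own_data : List Int) : Decidable (Pre_check_win_or_lose enemy_rps own_data) := by unfold Pre_check_win_or_lose; infer_instance
def pvWitness_check_win_or_lose : List Int × List Int := ([1, 1, 1], [2, 2, 2, 2, 2, 2])
def Spec_check_win_or_lose (enemy_rps : List Int) (own_data : List Int) (out : Option (List Int)) : Prop := out = check_win_or_lose_alt enemy_rps own_data
instance (enemy_rps : List Int) (own_data : List Int) (out : Option (List Int)) : Decidable (Spec_check_win_or_lose enemy_rps own_data out) := by unfold Spec_check_win_or_lose; infer_instance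

-- ===== CLAIM (what is proved, stated in full; the proofs are below) =====
def Claim_equal_check_win_or_lose : Prop := ∀ (enemy_rps : List Int) (own_data : List Int), Dom_check_win_or_lose enemy_rps own_data → Pre_check_win_or_lose enemy_rps own_data → Spec_check_win_or_lose enemy_rps own_data (check_win_or_lose enemy_rps own_data)

-- ===== LEMMAS AND PROOFS =====
theorem findSome3 {α β : Type} (f : α → Option β) (a b c : α) :
    ([a, b, c] : List α).findSome? f =
      (f a).orElse fun _ => (f b).orElse fun _ => f c := by
  cases ha : f a <;> cases hb : f b <;> cases hc : f c <;>
    simp [List.findSome?, Option.orElse, ha, hb, hc]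

theorem goAlt_nil (e : List Int) (s : List Int) :
    goAlt e [] s =
      if s.getD 0 0 > e.getD 0 0 ∧ s.getD 1 0 > e.getD 1 0 ∧ s.getD 2 0 > e.getD 2 0 then
        some s
      else
        none := rfl

theorem goAlt_cons (e : List Int) (x : Int) (xs s : List Int) :
    goAlt e (x :: xs) s =
      ([0, 1, 2] : List Nat).findSome? fun g =>
        goAlt e xs (s.set g (s.getD g 0 + x)) := by
  rw [findSome3]
  rfl

-- ===== VERDICT (by name: the statement is the Claim_ definition above) =====
theorem check_win_or_lose_spec : Claim_equal_check_win_or_lose := by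
  intro enemy_rps own_data _ hpre
  obtain ⟨-, ho⟩ := hpre
  unfold Spec_check_win_or_lose
  obtain ⟨o0, o1, o2, o3, o4, o5, r, rfl⟩ :
      ∃ o0 o1 o2 o3 o4 o5 r,
        own_data = o0 :: o1 :: o2 :: o3 :: o4 :: o5 :: r := by
    rcases own_data with _ | ⟨o0, _ | ⟨o1, _ | ⟨o2, _ | ⟨o3, _ | ⟨o4, _ | ⟨o5, r⟩⟩⟩⟩⟩⟩ <;>
      first
        | exact ⟨o0, o1, o2, o3, o4, o5, r, rfl⟩
        | (exfalso; simp at ho)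
  simp only [check_win_or_lose_alt, List.range_succ, List.range_zero, List.map_cons, List.map_nil, List.nil_append, List.cons_append,
    List.getD_cons_zero, List.getD_cons_succ, goAlt_cons, goAlt_nil]
  simp only [check_win_or_lose, calc_own_rps, List.foldl,
    List.getD_cons_zero, List.getD_cons_succ]
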